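-- pv_equiv track=rewrite | github.com/zqp111/leetcode_everyday | src/1702.修改后的最大二进制字符串.py | maximumBinaryString
-- ===== SOURCE A (Python) =====
-- def maximumBinaryString(binary: str) -> str:
--     binary = list(binary)
--     index = 0
--     status = 0
--     startIndex = None
--     while index < len(binary):
--         if status == 0:
--             if binary[index] == '0':
--                 status = 1
--                 startIndex = index
--             # index += 1
--         elif status == 1:
--             if binary[index] == '0':
--                 binary[startIndex] = '1'
--                 startIndex += 1
--                 status = 1
--             else:
--                 status = 2
--             # index += 1
--         elif status == 2:
--             if binary[index] == '0':
--                 binary[startIndex] = '1'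
--                 binary[startIndex+1] = '0'
--                 binary[index] = '1'
--                 startIndex += 1
--         index += 1
--     return ''.join(binary)
-- ===== SOURCE B (Python) =====
-- def maximumBinaryString(binary: str) -> str:
--     z = binary.count('0')
--     if z == 0:
--         return binary
--     i = binary.index('0')
--     return binary[:i] + '1' * (z - 1) + '0' + binary[i + z:].replace('0', '1')
-- ===== Notes on version B (the rewrite author's own statement) =====
-- stated objective: simpler
-- what changed: Replaced the three-state in-place rewriting scan with a direct closed-form construction: count the zeros, locate the first zero, and concatenate the untouched prefix, a run of ones, the single remaining zero, and the suffix with its zeros turned into ones.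
import Mathlib
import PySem

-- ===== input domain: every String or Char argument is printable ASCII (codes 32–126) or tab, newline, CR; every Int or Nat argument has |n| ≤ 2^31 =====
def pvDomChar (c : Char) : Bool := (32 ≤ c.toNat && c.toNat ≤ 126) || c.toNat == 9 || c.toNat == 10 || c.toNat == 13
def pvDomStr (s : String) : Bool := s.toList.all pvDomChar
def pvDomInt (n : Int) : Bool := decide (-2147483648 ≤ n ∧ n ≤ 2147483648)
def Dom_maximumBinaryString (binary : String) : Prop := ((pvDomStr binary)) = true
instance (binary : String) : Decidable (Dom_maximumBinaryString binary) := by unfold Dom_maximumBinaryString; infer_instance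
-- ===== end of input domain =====

-- B replaces A's three-state in-place rewriting scan with a direct closed-form construction
-- (count zeros, find first zero, concatenate); objective: simpler.

-- ===== PORT A =====
-- the while loop of A: state = (list, index, status, startIndex); Python's `startIndex = None`
-- is represented by the unused initial value 0 (it is never read while status = 0).
def pvLoopA (binary : List Char) (index status startIndex : Nat) : List Char :=
  if h : index < binary.length then
    if status = 0 then
      if binary[index] = '0' then pvLoopA binary (index+1) 1 index
      else pvLoopA binary (index+1) 0 startIndex
    else if status = 1 then
      if binary[index] = '0' then pvLoopA (binary.set startIndex '1') (index+1) 1 (startIndex+1)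
      else pvLoopA binary (index+1) 2 startIndex
    else
      if binary[index] = '0' then
        pvLoopA (((binary.set startIndex '1').set (startIndex+1) '0').set index '1')
          (index+1) 2 (startIndex+1)
      else pvLoopA binary (index+1) 2 startIndex
  else binary
termination_by binary.length - index
decreasing_by all_goals first | omega | (simp [List.length_set]; omega)

def maximumBinaryString (binary : String) : String :=
  String.ofList (pvLoopA binary.toList 0 0 0)

-- ===== PORT B =====
-- literal port of Source B over the character list: count('0'), index('0'), slices, replace('0','1')
def maximumBinaryString_alt (binary : String) : String :=
  let l := binary.toList
  let z := l.count '0'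
  if z = 0 then binary
  else
    let i := l.findIdx (· == '0')
    String.ofList (l.take i ++ List.replicate (z - 1) '1' ++
      '0' :: (l.drop (i + z)).map (fun c => if c = '0' then '1' else c))

-- ===== PRECONDITION & SPEC =====
def Spec_maximumBinaryString (binary : String) (out : String) : Prop := out = maximumBinaryString_alt binary
instance (binary : String) (out : String) : Decidable (Spec_maximumBinaryString binary out) := by unfold Spec_maximumBinaryString; infer_instance

-- ===== CLAIM (what is proved, stated in full; the proofs are below) =====
def Claim_equal_maximumBinaryString : Prop := ∀ (binary : String), Dom_maximumBinaryString binary → Spec_maximumBinaryString binary (maximumBinaryString binary)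

-- ===== LEMMAS AND PROOFS =====

-- '0' is replaced by '1', anything else kept (the effect of replace('0','1') on one char)
def pvSub (cl : Char) : Char := if cl = '0' then '1' else cl

-- pointwise description of the loop state: positions < i untouched, [i, s) rewritten to '1',
-- the pending '0' at s, processed positions (s, idx) with zeros already turned to ones,
-- positions ≥ idx still untouched
def pvInv (orig cl : List Char) (i s idx : Nat) : Prop :=
  ∀ j, j < orig.length →
    cl.getD j ' ' =
      if j < i then orig.getD j ' '
      else if j < s then '1'
      else if j = s then '0'
      else if j < idx then pvSub (orig.getD j ' ')
      else orig.getD j ' '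

lemma pv_getD_set {l : List Char} {i j : Nat} {a d : Char} (hj : j < l.length) :
    (l.set i a).getD j d = if i = j then a else l.getD j d := by
  by_cases h : i = j
  · subst h
    simp [List.getD_eq_getElem?_getD, List.getElem?_set_self (by omega : i < l.length)]
  · simp [List.getD_eq_getElem?_getD, List.getElem?_set_ne h, h]

lemma pv_getD_eq (l : List Char) {j : Nat} (hj : j < l.length) :
    l.getD j ' ' = l[j] := by
  simp [List.getD_eq_getElem?_getD, List.getElem?_eq_getElem hj]

lemma pv_count_drop_succ (l : List Char) {idx : Nat} (h : idx < l.length) :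
    (l.drop idx).count '0' =
      (if l.getD idx ' ' = '0' then 1 else 0) + (l.drop (idx+1)).count '0' := by
  rw [List.drop_eq_getElem_cons h, pv_getD_eq l h]
  by_cases hz : l[idx] = '0' <;> simp only [List.count_cons, hz, if_pos] <;> simp [hz] <;> omega

-- the loop in status 2 consumes the rest, moving the pending '0' right once per remaining zero
lemma pv_loop2 (orig : List Char) : ∀ (k : Nat) (cl : List Char) (i s idx : Nat),
    cl.length = orig.length → orig.length - idx = k → i ≤ s → s + 2 ≤ idx →
    pvInv orig cl i s idx →
    (pvLoopA cl idx 2 s).length = orig.length ∧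
      pvInv orig (pvLoopA cl idx 2 s) i (s + (orig.drop idx).count '0') orig.length := by
  intro k
  induction k with
  | zero =>
    intro cl i s idx hlen hk hi hs hinv
    have hidx : orig.length ≤ idx := by omega
    rw [pvLoopA]
    rw [dif_neg (by omega : ¬ idx < cl.length)]
    have : (orig.drop idx).count '0' = 0 := by
      simp [List.drop_eq_nil_of_le hidx]
    rw [this]
    refine ⟨hlen, ?_⟩
    intro j hj
    have := hinv j hj
    rw [this]
    split_ifs <;> first | rfl | omega
  | succ k ih =>
    intro cl i s idx hlen hk hi hs hinv
    have hidx : idx < orig.length := by omega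
    have hcidx : idx < cl.length := by omega
    have hread : cl.getD idx ' ' = orig.getD idx ' ' := by
      have := hinv idx hidx
      rw [this]
      have h1 : ¬ idx < i := by omega
      have h2 : ¬ idx < s := by omega
      have h3 : ¬ idx = s := by omega
      simp [h1, h2, h3]
    rw [pvLoopA]
    rw [dif_pos hcidx]
    rw [if_neg (by decide : ¬ (2:ℕ) = 0), if_neg (by decide : ¬ (2:ℕ) = 1)]
    by_cases hz : orig.getD idx ' ' = '0'
    · rw [if_pos (by rw [← pv_getD_eq cl hcidx, hread, hz])]
      have hslen : s < cl.length := by omega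
      have hs1len : s + 1 < cl.length := by omega
      set cl' := ((cl.set s '1').set (s+1) '0').set idx '1' with hc'
      have hlen' : cl'.length = orig.length := by simp [hc', hlen]
      have hinv' : pvInv orig cl' i (s+1) (idx+1) := by
        intro j hj
        have hjc : j < cl.length := by omega
        have hbase := hinv j hj
        have e1 : cl'.getD j ' ' =
            if idx = j then '1' else if s + 1 = j then '0' else if s = j then '1'
              else cl.getD j ' ' := by
          rw [hc', pv_getD_set (by simp [List.length_set]; omega),
              pv_getD_set (by simp [List.length_set]; omega), pv_getD_set hjc]
        rw [e1, hbase]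
        rcases Nat.lt_trichotomy j i with hji | hji | hji
        · have : ¬ idx = j := by omega
          have : ¬ s + 1 = j := by omega
          have : ¬ s = j := by omega
          split_ifs <;> rfl
        · -- j = i
          subst hji
          by_cases hjs : j = s
          · -- i = s: position becomes '1' unless s+1... i=s=j: idx=j? no. s+1=j? no. s=j yes → '1'
            have h1 : ¬ idx = j := by omega
            have h2 : ¬ s + 1 = j := by omega
            split_ifs <;> first | rfl | omega
          · have hjls : j < s := by omega
            have h1 : ¬ idx = j := by omega
            have h2 : ¬ s + 1 = j := by omega
            have h3 : ¬ s = j := by omega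
            split_ifs <;> first | rfl | omega
        · -- i < j
          rcases Nat.lt_trichotomy j s with hjs | hjs | hjs
          · have h1 : ¬ idx = j := by omega
            have h2 : ¬ s + 1 = j := by omega
            have h3 : ¬ s = j := by omega
            split_ifs <;> first | rfl | omega
          · subst hjs
            have h1 : ¬ idx = j := by omega
            have h2 : ¬ j + 1 = j := by omega
            split_ifs <;> first | rfl | omega
          · by_cases hj1 : j = s + 1
            · subst hj1
              have h1 : ¬ idx = s + 1 := by omega
              split_ifs <;> first | rfl | omega
            · by_cases hjidx : j = idx
              · subst hjidx
                have h2 : ¬ s + 1 = j := by omega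
                have h3 : ¬ s = j := by omega
                have hz' : orig[j]?.getD ' ' = '0' := by
                  simpa [List.getD_eq_getElem?_getD] using hz
                split_ifs <;> first | rfl | omega | simp [pvSub, hz']
              · have h1 : ¬ idx = j := by omega
                have h2 : ¬ s + 1 = j := by omega
                have h3 : ¬ s = j := by omega
                split_ifs <;> first | rfl | omega
      have := ih cl' i (s+1) (idx+1) hlen' (by omega) (by omega) (by omega) hinv'
      rw [pv_count_drop_succ orig hidx, if_pos hz]
      have harith : s + (1 + (orig.drop (idx+1)).count '0') =
          s + 1 + (orig.drop (idx+1)).count '0' := by omega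
      rw [harith]
      exact this
    · rw [if_neg (by rw [← pv_getD_eq cl hcidx, hread]; exact hz)]
      have hinv' : pvInv orig cl i s (idx+1) := by
        intro j hj
        have hbase := hinv j hj
        rw [hbase]
        by_cases hjidx : j = idx
        · subst hjidx
          have h1 : ¬ j < i := by omega
          have h2 : ¬ j < s := by omega
          have h3 : ¬ j = s := by omega
          have h4 : ¬ j < j := by omega
          have h5 : j < j + 1 := by omega
          have hz' : ¬ orig[j]?.getD ' ' = '0' := by
            simpa [List.getD_eq_getElem?_getD] using hz
          simp [h1, h2, h5, pvSub, hz']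
        · split_ifs <;> first | rfl | omega
      have := ih cl i s (idx+1) hlen (by omega) hi (by omega) hinv'
      rw [pv_count_drop_succ orig hidx, if_neg hz]
      simpa using this

-- the loop in status 1 (pending '0' at s, index = s+1)
lemma pv_loop1 (orig : List Char) : ∀ (k : Nat) (cl : List Char) (i s : Nat),
    cl.length = orig.length → orig.length - (s+1) = k → i ≤ s →
    pvInv orig cl i s (s+1) →
    (pvLoopA cl (s+1) 1 s).length = orig.length ∧
      pvInv orig (pvLoopA cl (s+1) 1 s) i (s + (orig.drop (s+1)).count '0') orig.length := by
  intro k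
  induction k with
  | zero =>
    intro cl i s hlen hk hi hinv
    have hidx : orig.length ≤ s + 1 := by omega
    rw [pvLoopA]
    rw [dif_neg (by omega : ¬ s + 1 < cl.length)]
    have : (orig.drop (s+1)).count '0' = 0 := by
      simp [List.drop_eq_nil_of_le hidx]
    rw [this]
    refine ⟨hlen, ?_⟩
    intro j hj
    have := hinv j hj
    rw [this]
    split_ifs <;> first | rfl | omega
  | succ k ih =>
    intro cl i s hlen hk hi hinv
    have hidx : s + 1 < orig.length := by omega
    have hcidx : s + 1 < cl.length := by omega
    have hread : cl.getD (s+1) ' ' = orig.getD (s+1) ' ' := by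
      have := hinv (s+1) hidx
      rw [this]
      have h1 : ¬ s + 1 < i := by omega
      have h2 : ¬ s + 1 < s := by omega
      have h3 : ¬ s + 1 = s := by omega
      have h4 : ¬ s + 1 < s + 1 := by omega
      simp [h1, h2]
    rw [pvLoopA]
    rw [dif_pos hcidx]
    rw [if_neg (by decide : ¬ (1:ℕ) = 0), if_pos (rfl : (1:ℕ) = 1)]
    by_cases hz : orig.getD (s+1) ' ' = '0'
    · rw [if_pos (by rw [← pv_getD_eq cl hcidx, hread, hz])]
      set cl' := cl.set s '1' with hc'
      have hlen' : cl'.length = orig.length := by simp [hc', hlen]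
      have hinv' : pvInv orig cl' i (s+1) (s+2) := by
        intro j hj
        have hjc : j < cl.length := by omega
        have hbase := hinv j hj
        rw [hc', pv_getD_set hjc, hbase]
        by_cases hjs : s = j
        · subst hjs
          have h1 : ¬ s < i := by omega
          split_ifs <;> first | rfl | omega
        · by_cases hj1 : j = s + 1
          · rw [hj1]
            have h0 : ¬ s = s + 1 := by omega
            have h1 : ¬ s + 1 < i := by omega
            have h2 : ¬ s + 1 < s := by omega
            have h3 : ¬ s + 1 = s := by omega
            have h4 : ¬ s + 1 < s + 1 := by omega
            have hz2 : orig[s+1]?.getD ' ' = '0' := by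
              simpa [List.getD_eq_getElem?_getD] using hz
            simp [h1, h2, hz2]
          · split_ifs <;> first | rfl | omega
      have := ih cl' i (s+1) hlen' (by omega) (by omega) hinv'
      rw [pv_count_drop_succ orig hidx, if_pos hz]
      have harith : s + (1 + (orig.drop (s+2)).count '0') =
          s + 1 + (orig.drop (s+2)).count '0' := by omega
      rw [harith]
      exact this
    · rw [if_neg (by rw [← pv_getD_eq cl hcidx, hread]; exact hz)]
      have hinv' : pvInv orig cl i s (s+2) := by
        intro j hj
        have hbase := hinv j hj
        rw [hbase]
        by_cases hj1 : j = s + 1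
        · rw [hj1]
          have h1 : ¬ s + 1 < i := by omega
          have h2 : ¬ s + 1 < s := by omega
          have h3 : ¬ s + 1 = s := by omega
          have h4 : ¬ s + 1 < s + 1 := by omega
          have h5 : s + 1 < s + 2 := by omega
          have hz' : ¬ orig[s+1]?.getD ' ' = '0' := by
            simpa [List.getD_eq_getElem?_getD] using hz
          simp [h1, h2, h5, pvSub, hz']
        · split_ifs <;> first | rfl | omega
      have := pv_loop2 orig (orig.length - (s+2)) cl i s (s+2) hlen rfl hi (by omega) hinv'
      rw [pv_count_drop_succ orig hidx, if_neg hz]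
      simpa using this

-- the loop in status 0 with no '0' at all just walks to the end
lemma pv_loop0_nozero (orig : List Char) (hz : orig.count '0' = 0) :
    ∀ (k idx s0 : Nat), orig.length - idx = k → pvLoopA orig idx 0 s0 = orig := by
  intro k
  induction k with
  | zero =>
    intro idx s0 hk
    rw [pvLoopA]
    simp [Nat.not_lt.mpr (by omega : orig.length ≤ idx)]
  | succ k ih =>
    intro idx s0 hk
    have hidx : idx < orig.length := by omega
    have hne : orig[idx] ≠ '0' := by
      intro h
      exact absurd (h ▸ List.getElem_mem hidx) (List.count_eq_zero.mp hz)
    rw [pvLoopA]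
    rw [dif_pos hidx]
    rw [if_pos (rfl : (0:ℕ) = 0), if_neg hne]
    exact ih (idx+1) s0 (by omega)

-- the loop in status 0 walks to the first zero, then hands over to status 1
lemma pv_loop0 (orig : List Char) (hz : orig.count '0' ≠ 0) :
    ∀ (k idx s0 : Nat), (orig.findIdx (· == '0')) - idx = k → idx ≤ orig.findIdx (· == '0') →
    (pvLoopA orig idx 0 s0).length = orig.length ∧
      pvInv orig (pvLoopA orig idx 0 s0) (orig.findIdx (· == '0'))
        (orig.findIdx (· == '0') + orig.count '0' - 1) orig.length := by
  have hmem : '0' ∈ orig := by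
    by_contra h
    exact hz (List.count_eq_zero.mpr h)
  have hfi : orig.findIdx (· == '0') < orig.length :=
    List.findIdx_lt_length_of_exists ⟨'0', hmem, by simp⟩
  have hfz : orig[orig.findIdx (· == '0')] = '0' := by
    have := List.findIdx_getElem (w := hfi) (p := (· == '0')) (xs := orig)
    simpa using this
  intro k
  induction k with
  | zero =>
    intro idx s0 hk hle
    have hidx : idx = orig.findIdx (· == '0') := by omega
    subst hidx
    rw [pvLoopA]
    rw [dif_pos hfi]
    rw [if_pos (rfl : (0:ℕ) = 0), if_pos hfz]
    set i := orig.findIdx (· == '0') with hi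
    have hinv : pvInv orig orig i i (i+1) := by
      intro j hj
      by_cases hji : j = i
      · rw [hji]
        have h1 : ¬ i < i := by omega
        have hfz' : orig.getD i ' ' = '0' := by rw [pv_getD_eq orig hfi]; exact hfz
        simp
        simpa [List.getD_eq_getElem?_getD] using hfz'
      · split_ifs <;> first | rfl | omega
    have := pv_loop1 orig (orig.length - (i+1)) orig i i rfl rfl (le_refl i) hinv
    have hc : (orig.drop (i+1)).count '0' = orig.count '0' - 1 := by
      have hsplit : orig.count '0' = (orig.take (i+1)).count '0' + (orig.drop (i+1)).count '0' := by
        rw [← List.count_append, List.take_append_drop]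
      have htake : (orig.take (i+1)).count '0' = 1 := by
        have h1 : orig.take (i+1) = orig.take i ++ [orig[i]] := List.take_succ_eq_append_getElem hfi
        have hnone : (orig.take i).count '0' = 0 := by
          rw [List.count_eq_zero]
          intro hmem'
          obtain ⟨j, hjlt, hje⟩ := List.getElem_of_mem hmem'
          have hjlen : j < i := by
            have h2 := hjlt
            simp [List.length_take] at h2
            omega
          have hoj := hje
          rw [List.getElem_take] at hoj
          have hnot := List.not_of_lt_findIdx (xs := orig) (p := (· == '0'))
            (show j < orig.findIdx (· == '0') by omega)
          simp at hnot
          exact hnot hoj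
        rw [h1, List.count_append, hnone, hfz]
        simp
      omega
    rw [hc] at this
    have harith : i + (orig.count '0' - 1) = i + orig.count '0' - 1 := by
      have : 1 ≤ orig.count '0' := by omega
      omega
    rw [harith] at this
    exact this
  | succ k ih =>
    intro idx s0 hk hle
    have hlt : idx < orig.findIdx (· == '0') := by omega
    have hidx : idx < orig.length := by omega
    have hne : orig[idx] ≠ '0' := by
      have := List.not_of_lt_findIdx (p := (· == '0')) (xs := orig) hlt
      simpa using this
    rw [pvLoopA]
    rw [dif_pos hidx]
    rw [if_pos (rfl : (0:ℕ) = 0), if_neg hne]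
    exact ih (idx+1) s0 (by omega) (by omega)

-- the closed-form list of B matches the pointwise description of the final loop state
lemma pv_target_eq (orig r : List Char) (hz : orig.count '0' ≠ 0)
    (hlen : r.length = orig.length)
    (hinv : pvInv orig r (orig.findIdx (· == '0'))
      (orig.findIdx (· == '0') + orig.count '0' - 1) orig.length) :
    r = orig.take (orig.findIdx (· == '0')) ++ List.replicate (orig.count '0' - 1) '1' ++
      '0' :: (orig.drop (orig.findIdx (· == '0') + orig.count '0')).map pvSub := by
  set i := orig.findIdx (· == '0') with hidef
  set z := orig.count '0' with hzdef
  have hmem : '0' ∈ orig := by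
    by_contra h
    exact hz (List.count_eq_zero.mpr h)
  have hfi : i < orig.length := List.findIdx_lt_length_of_exists ⟨'0', hmem, by simp⟩
  have hiz : i + z ≤ orig.length := by
    have h1 : (orig.drop i).count '0' ≤ (orig.drop i).length := List.count_le_length
    have h2 : (orig.take i).count '0' = 0 := by
      rw [List.count_eq_zero]
      intro hmem'
      obtain ⟨j, hjlt, hje⟩ := List.getElem_of_mem hmem'
      have hjlen : j < i := by simp [List.length_take] at hjlt; omega
      have : orig[j]'(by omega) = '0' := by rw [← hje]; exact (List.getElem_take).symm
      exact absurd this (by simpa using List.not_of_lt_findIdx (xs := orig) (p := (· == '0')) hjlen)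
    have h3 : z = (orig.take i).count '0' + (orig.drop i).count '0' := by
      rw [hzdef, ← List.count_append, List.take_append_drop]
    simp [List.length_drop] at h1
    omega
  have hz1 : 1 ≤ z := by omega
  apply List.ext_getElem
  · simp [hlen, List.length_take]
    omega
  · intro j hj hj'
    have hjo : j < orig.length := by omega
    have hlt : (List.take i orig).length = i := by
      simp [List.length_take]; omega
    have hlr : (List.take i orig ++ List.replicate (z - 1) '1').length = i + (z - 1) := by
      simp [List.length_take]; omega
    rw [← pv_getD_eq r (by omega), hinv j hjo]
    by_cases h1 : j < i
    · rw [if_pos h1, List.getElem_append, dif_pos (by omega), List.getElem_append,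
        dif_pos (by omega), List.getElem_take, pv_getD_eq orig hjo]
    · rw [if_neg h1]
      by_cases h2 : j < i + z - 1
      · rw [if_pos h2, List.getElem_append, dif_pos (by omega), List.getElem_append,
          dif_neg (by omega)]
        rw [List.getElem_replicate]
      · rw [if_neg h2]
        by_cases h3 : j = i + z - 1
        · rw [if_pos h3, List.getElem_append, dif_neg (by omega)]
          have h4 : j - (List.take i orig ++ List.replicate (z - 1) '1').length = 0 := by omega
          simp only [h4, List.getElem_cons_zero]
        · rw [if_neg h3, if_pos hjo, List.getElem_append, dif_neg (by omega)]
          have h4 : j - (List.take i orig ++ List.replicate (z - 1) '1').length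
              = (j - (i + z)) + 1 := by omega
          simp only [h4, List.getElem_cons_succ, List.getElem_map, List.getElem_drop,
            pv_getD_eq orig hjo]
          congr 2
          omega

-- ===== VERDICT (by name: the statement is the Claim_ definition above) =====
theorem maximumBinaryString_spec : Claim_equal_maximumBinaryString := by
  intro binary _
  unfold Spec_maximumBinaryString maximumBinaryString maximumBinaryString_alt
  dsimp only
  by_cases hz : binary.toList.count '0' = 0
  · rw [pv_loop0_nozero binary.toList hz binary.toList.length 0 0 rfl, if_pos hz]
    exact String.ofList_toList
  · have h := pv_loop0 binary.toList hz (binary.toList.findIdx (· == '0')) 0 0 rfl (Nat.zero_le _)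
    have heq := pv_target_eq binary.toList _ hz h.1 h.2
    rw [heq, if_neg hz]
    rfl
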